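-- pv_equiv track=rewrite | github.com/Ananta-dot/misr_new | misr_seek_pkl.py | seq_spans
-- ===== SOURCE A (Python) =====
-- from typing import Dict, List, Tuple
--
-- Seq = List[int]
--
-- def seq_spans(seq: Seq) -> List[Tuple[int, int]]:
--     """Return [l_i, r_i] (indices of the two occurrences) for labels i=1..n."""
--     first = {}
--     spans = {}
--     for idx, lab in enumerate(seq):
--         if lab not in first:
--             first[lab] = idx
--         else:
--             spans[lab] = (first[lab], idx)
--     n = max(seq) if seq else 0
--     return [spans[i] for i in range(1, n + 1)]
-- ===== SOURCE B (Python) =====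
-- from typing import Dict, List, Tuple
--
-- Seq = List[int]
--
-- def seq_spans(seq: Seq) -> List[Tuple[int, int]]:
--     """Return [l_i, r_i] (indices of the two occurrences) for labels i=1..n."""
--     n = max(seq) if seq else 0
--     rev = seq[::-1]
--     last = len(seq) - 1
--     return [(seq.index(i), last - rev.index(i)) for i in range(1, n + 1)]
-- ===== Notes on version B (the rewrite author's own statement) =====
-- stated objective: alternative
-- what changed: Drops both dicts and the single stateful pass entirely: for each label 1..n, B finds the first occurrence by a forward search (list.index) and the last by a search in the reversed list, so no per-element state is maintained at all.
import Mathlib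
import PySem

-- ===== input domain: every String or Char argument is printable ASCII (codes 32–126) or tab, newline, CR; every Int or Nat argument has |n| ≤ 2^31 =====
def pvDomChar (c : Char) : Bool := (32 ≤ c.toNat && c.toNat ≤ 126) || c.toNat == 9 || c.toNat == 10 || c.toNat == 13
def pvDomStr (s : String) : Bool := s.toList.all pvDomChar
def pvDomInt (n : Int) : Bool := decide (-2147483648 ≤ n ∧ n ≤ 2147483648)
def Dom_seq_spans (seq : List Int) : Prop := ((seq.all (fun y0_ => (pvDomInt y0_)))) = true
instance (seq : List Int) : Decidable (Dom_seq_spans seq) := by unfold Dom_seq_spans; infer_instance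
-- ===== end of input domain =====

-- B replaces A's stateful single pass over two dicts by dict-free per-label searches:
-- first occurrence by list.index on the sequence, last occurrence via list.index on the
-- reversed sequence; objective: alternative (no state maintained, at quadratic worst cost).

-- ===== PORT A =====
def seq_spans (seq : List Int) : List (Int × Int) :=
  let st := (PySem.List.enumerate seq).foldl
      (fun (st : PySem.Dict Int Int × PySem.Dict Int (Int × Int)) p =>
        if st.1.contains p.2 = false then (st.1.insert p.2 p.1, st.2)
        else (st.1, st.2.insert p.2 ((st.1.get? p.2).getD 0, p.1)))
      (PySem.Dict.empty, PySem.Dict.empty)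
  let n : Int := if seq = [] then 0 else (PySem.List.max? seq id).getD 0
  (PySem.List.pyRange 1 (n + 1) 1).map (fun i => (st.2.get? i).getD (0, 0))

-- ===== PORT B =====
def seq_spans_alt (seq : List Int) : List (Int × Int) :=
  let n : Int := if seq = [] then 0 else (PySem.List.max? seq id).getD 0
  let rev := (PySem.List.slice? seq none none (-1)).getD []   -- seq[::-1]
  let last : Int := (seq.length : Int) - 1
  (PySem.List.pyRange 1 (n + 1) 1).map (fun i =>
    ((((PySem.List.index? seq i).getD 0 : Nat) : Int),
      last - (((PySem.List.index? rev i).getD 0 : Nat) : Int)))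

-- ===== PRECONDITION & SPEC =====
-- Pre_ excludes exactly the inputs on which A raises KeyError: some label in 1..max(seq)
-- occurs fewer than twice in seq.
-- (the first conjunct is a pigeonhole consequence of the second; it is stated so that the
-- condition evaluates without materialising range(1, max+1) when max(seq) is huge)
def Pre_seq_spans (seq : List Int) : Prop :=
  2 * (if seq = [] then 0 else (PySem.List.max? seq id).getD 0) ≤ (seq.length : Int) ∧
  ∀ i ∈ PySem.List.pyRange 1 (((if seq = [] then 0 else (PySem.List.max? seq id).getD 0)) + 1) 1,
    2 ≤ seq.count i
instance (seq : List Int) : Decidable (Pre_seq_spans seq) := by unfold Pre_seq_spans; infer_instance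
def pvWitness_seq_spans : List Int := [1, 2, 1, 2]

def Spec_seq_spans (seq : List Int) (out : List (Int × Int)) : Prop := out = seq_spans_alt seq
instance (seq : List Int) (out : List (Int × Int)) : Decidable (Spec_seq_spans seq out) := by unfold Spec_seq_spans; infer_instance

-- ===== CLAIM (what is proved, stated in full; the proofs are below) =====
def Claim_equal_seq_spans : Prop := ∀ (seq : List Int), Dom_seq_spans seq → Pre_seq_spans seq → Spec_seq_spans seq (seq_spans seq)

-- ===== LEMMAS AND PROOFS =====

-- the list of indices at which label `lab` occurs in the enumerated pairs
def pvOcc (lab : Int) (ps : List (Int × Int)) : List Int :=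
  (ps.filter (fun p => p.2 == lab)).map (fun p => p.1)

theorem pvOcc_append_singleton (lab : Int) (qs : List (Int × Int)) (p : Int × Int) :
    pvOcc lab (qs ++ [p]) = pvOcc lab qs ++ (if p.2 = lab then [p.1] else []) := by
  simp [pvOcc, List.filter_append]
  split_ifs with h <;> simp [h]

-- characterisation of A's fold state
theorem A_char (ps : List (Int × Int)) (lab : Int) :
    ((ps.foldl
      (fun (st : PySem.Dict Int Int × PySem.Dict Int (Int × Int)) p =>
        if st.1.contains p.2 = false then (st.1.insert p.2 p.1, st.2)
        else (st.1, st.2.insert p.2 ((st.1.get? p.2).getD 0, p.1)))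
      (PySem.Dict.empty, PySem.Dict.empty)).1.get? lab = (pvOcc lab ps).head?)
    ∧ ((ps.foldl
      (fun (st : PySem.Dict Int Int × PySem.Dict Int (Int × Int)) p =>
        if st.1.contains p.2 = false then (st.1.insert p.2 p.1, st.2)
        else (st.1, st.2.insert p.2 ((st.1.get? p.2).getD 0, p.1)))
      (PySem.Dict.empty, PySem.Dict.empty)).2.get? lab =
      if 2 ≤ (pvOcc lab ps).length then
        some ((pvOcc lab ps).head?.getD 0, (pvOcc lab ps).getLast?.getD 0)
      else none) := by
  induction ps using List.reverseRecOn generalizing lab with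
  | nil => simp [pvOcc, PySem.Dict.get?_empty]
  | append_singleton qs p ih =>
    rw [List.foldl_append, List.foldl_cons, List.foldl_nil]
    have hcont : ((qs.foldl
      (fun (st : PySem.Dict Int Int × PySem.Dict Int (Int × Int)) p =>
        if st.1.contains p.2 = false then (st.1.insert p.2 p.1, st.2)
        else (st.1, st.2.insert p.2 ((st.1.get? p.2).getD 0, p.1)))
      (PySem.Dict.empty, PySem.Dict.empty)).1.contains p.2) = (pvOcc p.2 qs).head?.isSome := by
      rw [PySem.Dict.contains_eq_isSome_get?, (ih p.2).1]
    by_cases h0 : pvOcc p.2 qs = []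
    · -- first occurrence of p.2 : insert branch
      rw [hcont]
      simp only [h0, List.head?_nil, Option.isSome_none, if_true]
      constructor
      · by_cases hk : lab = p.2
        · subst hk
          rw [PySem.Dict.get?_insert_self, pvOcc_append_singleton, h0]
          simp
        · rw [PySem.Dict.get?_insert_of_ne _ _ hk, (ih lab).1, pvOcc_append_singleton]
          have : p.2 ≠ lab := fun he => hk he.symm
          simp [this]
      · rw [(ih lab).2, pvOcc_append_singleton]
        by_cases hk : p.2 = lab
        · subst hk
          rw [h0]
          simp
        · simp [hk]
    · -- repeated occurrence : spans insert branch
      rw [hcont]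
      have hs : (pvOcc p.2 qs).head?.isSome = true := by
        cases hx : pvOcc p.2 qs with
        | nil => exact absurd hx h0
        | cons a l => simp
      simp only [hs, Bool.true_eq_false, if_false]
      constructor
      · rw [(ih lab).1, pvOcc_append_singleton]
        by_cases hk : p.2 = lab
        · subst hk
          cases hx : pvOcc p.2 qs with
          | nil => exact absurd hx h0
          | cons a l => simp
        · simp [hk]
      · by_cases hk : lab = p.2
        · subst hk
          rw [PySem.Dict.get?_insert_self, (ih p.2).1, pvOcc_append_singleton]
          obtain ⟨a, l, hx⟩ : ∃ a l, pvOcc p.2 qs = a :: l := by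
            cases hx : pvOcc p.2 qs with
            | nil => exact absurd hx h0
            | cons a l => exact ⟨a, l, rfl⟩
          rw [hx]
          have hgl : (a :: (l ++ [p.1])).getLast? = some p.1 := by
            rw [← List.cons_append, List.getLast?_concat]
          simp only [if_true, List.cons_append, hgl]
          rw [if_pos (by simp)]
          simp
        · rw [PySem.Dict.get?_insert_of_ne _ _ hk, (ih lab).2, pvOcc_append_singleton]
          have : p.2 ≠ lab := fun he => hk he.symm
          simp [this]

-- the occurrence list has one index per occurrence of the label
theorem occ_length (xs : List Int) (s lab : Int) :
    (pvOcc lab (PySem.List.enumerate xs s)).length = xs.count lab := by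
  induction xs generalizing s with
  | nil => simp [pvOcc, PySem.List.enumerate_nil]
  | cons x xs ih =>
    rw [PySem.List.enumerate_cons]
    by_cases h : x = lab
    · simp [pvOcc, h, ← ih (s + 1)]
    · simp [pvOcc, h, ← ih (s + 1)]

-- its head is the forward-search index
theorem occ_head (xs : List Int) (s lab : Int) :
    (pvOcc lab (PySem.List.enumerate xs s)).head? =
      (PySem.List.index? xs lab).map (fun k => s + (k : Int)) := by
  induction xs generalizing s with
  | nil => simp [pvOcc, PySem.List.enumerate_nil, PySem.List.index?]
  | cons x xs ih =>
    rw [PySem.List.enumerate_cons]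
    by_cases h : x = lab
    · subst h
      rw [PySem.List.index?_cons_self]
      simp [pvOcc]
    · rw [PySem.List.index?_cons_of_ne _ h]
      have hstep : pvOcc lab ((s, x) :: PySem.List.enumerate xs (s + 1)) =
          pvOcc lab (PySem.List.enumerate xs (s + 1)) := by
        simp [pvOcc, h]
      rw [hstep, ih (s + 1)]
      cases hk : PySem.List.index? xs lab with
      | none => simp
      | some k => simp; ring

-- its last element is the backward-search index, counted from the end
theorem occ_getLast (xs : List Int) (s lab : Int) :
    (pvOcc lab (PySem.List.enumerate xs s)).getLast? =
      (PySem.List.index? xs.reverse lab).map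
        (fun k => s + ((xs.length : Int) - 1 - (k : Int))) := by
  induction xs using List.reverseRecOn generalizing s with
  | nil => simp [pvOcc, PySem.List.enumerate_nil, PySem.List.index?]
  | append_singleton ys y ih =>
    rw [PySem.List.enumerate_append, PySem.List.enumerate_cons, PySem.List.enumerate_nil,
      ← List.singleton_append, ← List.append_assoc, List.append_nil, pvOcc_append_singleton,
      List.reverse_append, List.reverse_singleton, List.singleton_append]
    by_cases h : y = lab
    · subst h
      rw [PySem.List.index?_cons_self]
      simp
    · rw [PySem.List.index?_cons_of_ne _ h]
      simp only [h, if_false, List.append_nil]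
      rw [ih s]
      cases hk : PySem.List.index? ys.reverse lab with
      | none => simp
      | some k => simp; ring

-- ===== VERDICT (by name: the statement is the Claim_ definition above) =====
theorem seq_spans_spec : Claim_equal_seq_spans := by
  intro seq _ hpre
  unfold Spec_seq_spans seq_spans seq_spans_alt
  rw [PySem.List.slice?_none_none_neg_one]
  simp only [Option.getD_some]
  refine List.map_congr_left ?_
  intro i hi
  have hc : 2 ≤ seq.count i := hpre.2 i hi
  rw [(A_char (PySem.List.enumerate seq) i).2]
  have hlen : (pvOcc i (PySem.List.enumerate seq)).length = seq.count i := occ_length seq 0 i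
  rw [if_pos (by omega)]
  have hmem : i ∈ seq := List.count_pos_iff.mp (by omega)
  obtain ⟨k, hk⟩ := Option.isSome_iff_exists.mp
    ((PySem.List.index?_isSome_iff _ _).mpr hmem)
  obtain ⟨k', hk'⟩ := Option.isSome_iff_exists.mp
    ((PySem.List.index?_isSome_iff _ _).mpr (List.mem_reverse.mpr hmem))
  have hh := occ_head seq 0 i
  have hl := occ_getLast seq 0 i
  rw [hk] at hh
  rw [hk'] at hl
  simp at hh hl
  rw [hh, hl, hk, hk']
  simp
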